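-- pv_equiv track=rewrite | github.com/SymmetricChaos/SimpleCAS | Geometry/IntegerPolygons.py | integer_octagon
-- ===== SOURCE A (Python) =====
-- def integer_octagon(n):
--     """Closest approximations of regular octagon with integer coordinates for vertices"""
--
--     a = 5
--     b = 7
--     a0,a1 = 1,2
--     b0,b1 = 1,3
--
--     for i in range(n):
--         a0, a1 = a1, 2*a0+a1
--         b0, b1 = b1, 2*b0+b1
--
--     a = a0
--     b = b0
--
--     P = [ [0,0] ]
--     old = [0,0]
--     for x,y in [(a*2,0),
--               (b,b),
--               (0,a*2),
--               (-b,b),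
--               (-a*2,0),
--               (-b,-b),
--               (0,-2*a)]:
--         new = [old[0]+x,old[1]+y]
--         P.append(new)
--         old = new
--
--     return P
-- ===== SOURCE B (Python) =====
-- def integer_octagon(n):
--     """Closest approximations of regular octagon with integer coordinates for vertices"""
--     m = n if n > 0 else 0
--     a = 1 << m                      # a = 2^m, closed form of the first Pell-like recurrence
--     sign = 1 if m % 2 == 0 else -1
--     b = (4 * a - sign) // 3         # b = (2^(m+2) - (-1)^m)/3, closed form of the second
--     return [[0, 0],
--             [2 * a, 0],
--             [2 * a + b, b],
--             [2 * a + b, b + 2 * a],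
--             [2 * a, 2 * a + 2 * b],
--             [0, 2 * a + 2 * b],
--             [-b, 2 * a + b],
--             [-b, b]]
-- ===== Notes on version B (the rewrite author's own statement) =====
-- stated objective: faster
-- what changed: Replaces the O(n) iteration of the two linear recurrences by their closed forms a = 2^n (a single bit-shift) and b = (2^(n+2) - (-1)^n)//3, and emits the eight vertices directly instead of accumulating them with a running-point loop.
import Mathlib
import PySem

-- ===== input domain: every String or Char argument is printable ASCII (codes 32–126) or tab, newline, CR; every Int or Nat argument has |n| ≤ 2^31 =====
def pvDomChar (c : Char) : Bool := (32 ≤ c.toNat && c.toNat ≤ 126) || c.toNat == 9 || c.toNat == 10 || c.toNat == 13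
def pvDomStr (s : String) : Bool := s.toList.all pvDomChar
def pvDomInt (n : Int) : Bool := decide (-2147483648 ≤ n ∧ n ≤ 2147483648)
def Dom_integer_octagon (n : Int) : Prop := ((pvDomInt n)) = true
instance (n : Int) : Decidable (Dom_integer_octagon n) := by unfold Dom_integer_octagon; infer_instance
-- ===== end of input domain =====

-- B replaces A's O(n) recurrence loop by the closed forms a = 2^n and b = (2^(n+2) - (-1)^n)/3
-- and emits the eight vertices directly (objective: faster, measured).

-- ===== PORT A =====
def integer_octagon (n : Int) : List (List Int) :=
  -- for i in range(n): a0,a1 = a1,2*a0+a1 ; b0,b1 = b1,2*b0+b1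
  let s := (PySem.List.pyRange 0 n 1).foldl
    (fun (st : (Int × Int) × (Int × Int)) _ =>
      ((st.1.2, 2 * st.1.1 + st.1.2), (st.2.2, 2 * st.2.1 + st.2.2)))
    ((1, 2), (1, 3))
  let a := s.1.1
  let b := s.2.1
  -- P = [[0,0]]; old = [0,0]; for x,y in …: new = [old[0]+x, old[1]+y]; P.append(new); old = new
  let r := [(a * 2, 0), (b, b), (0, a * 2), (-b, b), (-a * 2, 0), (-b, -b), (0, -2 * a)].foldl
    (fun (acc : List (List Int) × (Int × Int)) xy =>
      ((acc.1 ++ [[acc.2.1 + xy.1, acc.2.2 + xy.2]]), (acc.2.1 + xy.1, acc.2.2 + xy.2)))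
    ([[0, 0]], (0, 0))
  r.1

-- ===== PORT B =====
def integer_octagon_alt (n : Int) : List (List Int) :=
  let m : Int := if n > 0 then n else 0
  let a : Int := 2 ^ m.toNat          -- 1 << m  (m ≥ 0, so toNat is exact)
  let sign : Int := if PySem.Int.mod m 2 == 0 then 1 else -1
  let b : Int := PySem.Int.floordiv (4 * a - sign) 3
  [[0, 0], [2 * a, 0], [2 * a + b, b], [2 * a + b, b + 2 * a],
   [2 * a, 2 * a + 2 * b], [0, 2 * a + 2 * b], [-b, 2 * a + b], [-b, b]]

-- ===== PRECONDITION & SPEC =====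
def Spec_integer_octagon (n : Int) (out : List (List Int)) : Prop := out = integer_octagon_alt n
instance (n : Int) (out : List (List Int)) : Decidable (Spec_integer_octagon n out) := by unfold Spec_integer_octagon; infer_instance

-- ===== CLAIM (what is proved, stated in full; the proofs are below) =====
def Claim_equal_integer_octagon : Prop := ∀ (n : Int), Dom_integer_octagon n → Spec_integer_octagon n (integer_octagon n)

-- ===== LEMMAS AND PROOFS =====

def pellStep (st : (Int × Int) × (Int × Int)) : (Int × Int) × (Int × Int) :=
  ((st.1.2, 2 * st.1.1 + st.1.2), (st.2.2, 2 * st.2.1 + st.2.2))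

def bf : Nat → Int
  | 0 => 1
  | k + 1 => 4 * 2 ^ k - bf k

theorem foldl_const_eq_iterate {α β : Type} (f : α → α) :
    ∀ (l : List β) (s : α), l.foldl (fun st _ => f st) s = f^[l.length] s := by
  intro l
  induction l with
  | nil => intro s; simp
  | cons x xs ih =>
      intro s
      simp [List.foldl, ih, Function.iterate_succ_apply]

theorem iterate_pellStep (k : Nat) :
    pellStep^[k] ((1, 2), (1, 3)) = ((2 ^ k, 2 ^ (k + 1)), (bf k, bf (k + 1))) := by
  induction k with
  | zero => simp [bf]
  | succ k ih =>
      rw [Function.iterate_succ_apply', ih]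
      simp [pellStep, bf, pow_succ]
      constructor <;> ring

theorem three_mul_bf (k : Nat) : 3 * bf k = 2 ^ (k + 2) - (-1 : Int) ^ k := by
  induction k with
  | zero => simp [bf]
  | succ k ih =>
      have : bf (k + 1) = 4 * 2 ^ k - bf k := rfl
      rw [this]
      rw [pow_succ (-1 : Int) k, pow_succ (2 : Int) (k + 2)]
      have h4 : (2 : Int) ^ (k + 2) = 4 * 2 ^ k := by ring
      rcases Nat.even_or_odd k with he | ho
      · rw [he.neg_one_pow] at *; linarith
      · rw [ho.neg_one_pow] at *; linarith

theorem floordiv_three_exact (q x : Int) (h : x = 3 * q) :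
    PySem.Int.floordiv x 3 = q := by
  rw [PySem.Int.floordiv_eq_iff_of_pos (by norm_num)]
  omega

theorem sign_eq_neg_one_pow (k : Nat) :
    (if PySem.Int.mod (k : Int) 2 == 0 then (1 : Int) else -1) = (-1 : Int) ^ k := by
  rw [PySem.Int.mod_eq_emod_of_pos (by norm_num : (0:Int) < 2)]
  rcases Nat.even_or_odd k with he | ho
  · have h : (k : Int) % 2 = 0 := by
      have := Nat.even_iff.mp he; omega
    simp [h, he.neg_one_pow]
  · have h : (k : Int) % 2 = 1 := by
      have := Nat.odd_iff.mp ho; omega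
    simp [h, ho.neg_one_pow]

theorem integer_octagon_eq (n : Int) : integer_octagon n = integer_octagon_alt n := by
  unfold integer_octagon integer_octagon_alt
  set k := n.toNat with hk
  have hm2 : (if n > 0 then n else 0) = (k : Int) := by
    split <;> omega
  have h := foldl_const_eq_iterate pellStep (PySem.List.pyRange 0 n 1) ((1, 2), (1, 3))
  rw [PySem.List.length_pyRange_one] at h
  have hlen : (n - 0).toNat = k := by omega
  rw [hlen, iterate_pellStep] at h
  simp only [pellStep] at h
  rw [h, hm2]
  have hb : PySem.Int.floordiv (4 * 2 ^ k - (-1 : Int) ^ k) 3 = bf k := by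
    apply floordiv_three_exact
    have h3 := three_mul_bf k
    have : (2 : Int) ^ (k + 2) = 4 * 2 ^ k := by ring
    linarith
  simp only [Int.toNat_natCast, sign_eq_neg_one_pow]
  rw [hb]
  generalize (2 : Int) ^ k = a
  generalize bf k = b
  simp [List.foldl]
  omega

-- ===== VERDICT (by name: the statement is the Claim_ definition above) =====
theorem integer_octagon_spec : Claim_equal_integer_octagon := by
  intro n _
  exact integer_octagon_eq n
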